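-- pv_equiv track=rewrite | github.com/pak21/aoc2023 | 10/10.py | make_expanded_grid
-- ===== SOURCE A (Python) =====
-- CONNECTIONS = {
--     '-': [(1, 0), (-1, 0)],
--     '|': [(0, -1), (0, 1)],
--     '7': [(-1, 0), (0, 1)],
--     'F': [(1, 0), (0, 1)],
--     'J': [(0, -1), (-1, 0)],
--     'L': [(1, 0), (0, -1)],
--
--     '.': []
-- }
--
-- def make_expanded_grid(grid_pipe_only):
--     # Expand the grid to twice the size, filling in the connector pieces
--     # This deliberately adds a border of '.' round the whole thing so we don't have to deal with
--     # the literal edge case of pipes being up against the current border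
--     height2 = 2 * len(grid_pipe_only) + 1
--     width2 = 2 * len(grid_pipe_only[0]) + 1
--     grid2 = [['.'] * width2 for _ in range(height2)]
--
--     for y, row in enumerate(grid_pipe_only):
--         for x, c in enumerate(row):
--             ny = 2*y+1
--             nx = 2*x+1
--             grid2[ny][nx] = c
--
--             for dx, dy in CONNECTIONS[c]:
--                 grid2[ny+dy][nx+dx] = '#'
--
--     return grid2
-- ===== SOURCE B (Python) =====
-- CONNECTIONS = {
--     '-': [(1, 0), (-1, 0)],
--     '|': [(0, -1), (0, 1)],
--     '7': [(-1, 0), (0, 1)],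
--     'F': [(1, 0), (0, 1)],
--     'J': [(0, -1), (-1, 0)],
--     'L': [(1, 0), (0, -1)],
--
--     '.': []
-- }
--
-- def make_expanded_grid(grid_pipe_only):
--     # Gather version: build the doubled grid cell by cell, each cell looking at
--     # the input pipes around it instead of scattering writes from each pipe.
--     height = len(grid_pipe_only)
--     width = len(grid_pipe_only[0])
--
--     def connects(y, x, d):
--         # True iff there is a pipe at (y, x) whose connections include direction d
--         if 0 <= y < height and 0 <= x < len(grid_pipe_only[y]):
--             return d in CONNECTIONS[grid_pipe_only[y][x]]
--         return False
--
--     def cell(i, j):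
--         y, x = i // 2, j // 2
--         if i % 2 == 1 and j % 2 == 1:
--             return grid_pipe_only[y][x] if x < len(grid_pipe_only[y]) else '.'
--         if i % 2 == 1:
--             return '#' if connects(y, x - 1, (1, 0)) or connects(y, x, (-1, 0)) else '.'
--         if j % 2 == 1:
--             return '#' if connects(y - 1, x, (0, 1)) or connects(y, x, (0, -1)) else '.'
--         return '.'
--
--     return [[cell(i, j) for j in range(2 * width + 1)]
--             for i in range(2 * height + 1)]
-- ===== Notes on version B (the rewrite author's own statement) =====
-- stated objective: alternative
-- what changed: A scatters: it iterates over input pipes and writes their connector marks into a mutable doubled grid; B gathers: it builds the doubled grid cell by cell, each cell deciding its own value by looking at the neighbouring input pipes through the same CONNECTIONS table.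
import Mathlib
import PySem

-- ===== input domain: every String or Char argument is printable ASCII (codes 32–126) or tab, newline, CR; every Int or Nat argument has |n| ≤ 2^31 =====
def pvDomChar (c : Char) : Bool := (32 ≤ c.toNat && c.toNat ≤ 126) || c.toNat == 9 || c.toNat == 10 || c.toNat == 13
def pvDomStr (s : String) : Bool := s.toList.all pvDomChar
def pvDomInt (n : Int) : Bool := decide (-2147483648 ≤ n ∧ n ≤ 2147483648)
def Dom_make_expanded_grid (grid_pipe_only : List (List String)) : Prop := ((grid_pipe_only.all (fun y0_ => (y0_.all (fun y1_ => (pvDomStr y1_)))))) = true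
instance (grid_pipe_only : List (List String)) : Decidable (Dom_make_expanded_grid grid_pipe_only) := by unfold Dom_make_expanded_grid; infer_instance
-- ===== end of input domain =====

-- B rebuilds the doubled grid by a per-cell gather from input neighbours instead of A's
-- per-pipe scatter of writes; same return value on Pre_, objective: alternative decomposition.

-- ===== PORT A =====

-- CONNECTIONS dict: a plain lookup table; Python raises KeyError on other strings,
-- those inputs are excluded by Pre_make_expanded_grid (here the lookup returns []).
def pvConn (c : String) : List (Int × Int) :=
  if c = "-" then [(1, 0), (-1, 0)]
  else if c = "|" then [(0, -1), (0, 1)]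
  else if c = "7" then [(-1, 0), (0, 1)]
  else if c = "F" then [(1, 0), (0, 1)]
  else if c = "J" then [(0, -1), (-1, 0)]
  else if c = "L" then [(1, 0), (0, -1)]
  else if c = "." then []
  else []

-- grid2[i][j] = v; indices produced by A are always ≥ 0 and (on Pre_) in range,
-- exactly where the Python assignment succeeds.
def pvSet2 (g : List (List String)) (i j : Int) (v : String) : List (List String) :=
  g.modify i.toNat (fun row => row.set j.toNat v)

def make_expanded_grid (grid_pipe_only : List (List String)) : List (List String) :=
  let height2 := 2 * grid_pipe_only.length + 1
  -- grid_pipe_only[0]: Python raises IndexError on []; Pre_ excludes the empty grid.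
  let width2 := 2 * (grid_pipe_only.headD []).length + 1
  let grid2 := List.replicate height2 (List.replicate width2 ".")
  (PySem.List.enumerate grid_pipe_only).foldl (fun grid2 yr =>
    (PySem.List.enumerate yr.2).foldl (fun grid2 xc =>
      let ny : Int := 2 * yr.1 + 1
      let nx : Int := 2 * xc.1 + 1
      let grid2 := pvSet2 grid2 ny nx xc.2
      (pvConn xc.2).foldl (fun grid2 d => pvSet2 grid2 (ny + d.2) (nx + d.1) "#") grid2)
      grid2) grid2

-- ===== PORT B =====

-- connects(y, x, d): a pipe at input position (y, x) whose connections include d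
def pvConnects (g : List (List String)) (y x : Int) (d : Int × Int) : Bool :=
  if 0 ≤ y ∧ y < (g.length : Int) ∧ 0 ≤ x ∧ x < ((g.getD y.toNat []).length : Int) then
    decide (d ∈ pvConn ((g.getD y.toNat []).getD x.toNat "."))
  else false

-- cell(i, j): value of the doubled grid at (i, j), gathered from the input
def pvCellB (g : List (List String)) (i j : Nat) : String :=
  let y := i / 2
  let x := j / 2
  if i % 2 = 1 ∧ j % 2 = 1 then
    if x < (g.getD y []).length then (g.getD y []).getD x "." else "."
  else if i % 2 = 1 then
    if pvConnects g y ((x : Int) - 1) (1, 0) || pvConnects g y x (-1, 0) then "#" else "."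
  else if j % 2 = 1 then
    if pvConnects g ((y : Int) - 1) x (0, 1) || pvConnects g y x (0, -1) then "#" else "."
  else "."

def make_expanded_grid_alt (grid_pipe_only : List (List String)) : List (List String) :=
  let height := grid_pipe_only.length
  let width := (grid_pipe_only.headD []).length
  (List.range (2 * height + 1)).map (fun i =>
    (List.range (2 * width + 1)).map (fun j => pvCellB grid_pipe_only i j))

-- ===== PRECONDITION & SPEC =====

-- Pre_ = exactly the inputs on which the Python A returns: the grid is non-empty
-- (A indexes grid[0]), no row is longer than the first (a longer row makes A assign
-- past the right border: IndexError), and every cell is a CONNECTIONS key (else KeyError).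
def Pre_make_expanded_grid (grid_pipe_only : List (List String)) : Prop :=
  grid_pipe_only ≠ [] ∧
  ∀ row ∈ grid_pipe_only, row.length ≤ (grid_pipe_only.headD []).length ∧
    ∀ c ∈ row, c ∈ (["-", "|", "7", "F", "J", "L", "."] : List String)
instance (grid_pipe_only : List (List String)) : Decidable (Pre_make_expanded_grid grid_pipe_only) := by
  unfold Pre_make_expanded_grid; infer_instance

def pvWitness_make_expanded_grid : List (List String) := [["F", "7"], ["L", "J"]]

def Spec_make_expanded_grid (grid_pipe_only : List (List String)) (out : List (List String)) : Prop := out = make_expanded_grid_alt grid_pipe_only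
instance (grid_pipe_only : List (List String)) (out : List (List String)) : Decidable (Spec_make_expanded_grid grid_pipe_only out) := by unfold Spec_make_expanded_grid; infer_instance

-- ===== CLAIM (what is proved, stated in full; the proofs are below) =====
def Claim_equal_make_expanded_grid : Prop := ∀ (grid_pipe_only : List (List String)), Dom_make_expanded_grid grid_pipe_only → Pre_make_expanded_grid grid_pipe_only → Spec_make_expanded_grid grid_pipe_only (make_expanded_grid grid_pipe_only)

-- ===== LEMMAS AND PROOFS =====

-- total 2-D read with default '.'
def pvGetf (g : List (List String)) (i j : Nat) : String := (g.getD i []).getD j "."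

def pvStepW (g : List (List String)) (w : Int × Int × String) : List (List String) :=
  pvSet2 g w.1 w.2.1 w.2.2

-- the flat list of writes A performs, in order
def pvWrites (g : List (List String)) : List (Int × Int × String) :=
  (PySem.List.enumerate g).flatMap (fun yr =>
    (PySem.List.enumerate yr.2).flatMap (fun xc =>
      (2 * yr.1 + 1, 2 * xc.1 + 1, xc.2) ::
        (pvConn xc.2).map (fun d => (2 * yr.1 + 1 + d.2, 2 * xc.1 + 1 + d.1, "#"))))

theorem pvA_as_fold (g : List (List String)) :
    make_expanded_grid g =
      (pvWrites g).foldl pvStepW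
        (List.replicate (2 * g.length + 1)
          (List.replicate (2 * (g.headD []).length + 1) ".")) := by
  have hfm : ∀ {α : Type} (l : List α) (f : α → List (Int × Int × String))
      (b : List (List String)),
      (l.flatMap f).foldl pvStepW b = l.foldl (fun b a => (f a).foldl pvStepW b) b := by
    intro α l f b
    rw [List.flatMap_def, List.foldl_flatten, List.foldl_map]
  simp only [make_expanded_grid, pvWrites, hfm, List.foldl_cons, List.foldl_map, pvStepW]


theorem pvGetf_set2 (g : List (List String)) (a b : Int) (v : String) (i j : Nat) :
    pvGetf (pvSet2 g a b v) i j =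
      if a.toNat = i ∧ b.toNat = j ∧ i < g.length ∧ j < (g.getD i []).length then v
      else pvGetf g i j := by
  unfold pvGetf pvSet2
  simp only [List.getD_eq_getElem?_getD, List.getElem?_modify]
  cases hgi : g[i]? with
  | none =>
    have hlen : g.length ≤ i := List.getElem?_eq_none_iff.mp hgi
    rw [if_neg (by intro h; omega)]
    simp
  | some r =>
    have hlt : i < g.length := by
      by_contra h
      rw [List.getElem?_eq_none (by omega)] at hgi
      exact absurd hgi (by simp)
    simp only [Option.map_eq_map, Option.map_some, Option.getD_some]
    by_cases hai : a.toNat = i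
    · simp only [hai, if_true, true_and]
      rw [List.getElem?_set]
      by_cases hbj : b.toNat = j
      · by_cases hjr : j < r.length
        · rw [if_pos hbj, if_pos (by omega), if_pos ⟨hbj, hlt, hjr⟩]
          rfl
        · rw [if_pos hbj, if_neg (by omega), if_neg (by intro h; exact hjr h.2.2)]
          simp [List.getElem?_eq_none (show r.length ≤ j by omega)]
      · rw [if_neg (by omega), if_neg (by intro h; exact hbj h.1)]
    · rw [if_neg hai, if_neg (by intro h; exact hai h.1)]

theorem pvShape_set2 (g : List (List String)) (a b : Int) (v : String) :
    (pvSet2 g a b v).length = g.length ∧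
    ∀ i, ((pvSet2 g a b v).getD i []).length = (g.getD i []).length := by
  unfold pvSet2
  refine ⟨by simp, ?_⟩
  intro i
  simp only [List.getD_eq_getElem?_getD, List.getElem?_modify]
  cases hgi : g[i]? with
  | none => simp
  | some r =>
    by_cases h : a.toNat = i <;> simp [h]


theorem pvShape_fold (ws : List (Int × Int × String)) (g : List (List String)) :
    (ws.foldl pvStepW g).length = g.length ∧
    ∀ i, ((ws.foldl pvStepW g).getD i []).length = (g.getD i []).length := by
  induction ws generalizing g with
  | nil => exact ⟨rfl, fun _ => rfl⟩
  | cons w ws ih =>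
    simp only [List.foldl_cons]
    obtain ⟨h1, h2⟩ := ih (pvStepW g w)
    obtain ⟨s1, s2⟩ := pvShape_set2 g w.1 w.2.1 w.2.2
    exact ⟨h1.trans s1, fun i => (h2 i).trans (s2 i)⟩


theorem pvFold_no_target (ws : List (Int × Int × String)) (g : List (List String)) (i j : Nat)
    (h : ∀ w ∈ ws, ¬(w.1.toNat = i ∧ w.2.1.toNat = j)) :
    pvGetf (ws.foldl pvStepW g) i j = pvGetf g i j := by
  induction ws generalizing g with
  | nil => rfl
  | cons w ws ih =>
    simp only [List.foldl_cons]
    rw [ih (pvStepW g w) (fun w' hw' => h w' (List.mem_cons_of_mem _ hw'))]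
    have hw := h w List.mem_cons_self
    rw [pvStepW, pvGetf_set2]
    rw [if_neg (by intro hc; exact hw ⟨hc.1, hc.2.1⟩)]


theorem pvFold_target (ws : List (Int × Int × String)) (g : List (List String)) (i j : Nat)
    (v : String)
    (hi : i < g.length) (hj : j < (g.getD i []).length)
    (hall : ∀ w ∈ ws, w.1.toNat = i ∧ w.2.1.toNat = j → w.2.2 = v)
    (hex : ∃ w ∈ ws, w.1.toNat = i ∧ w.2.1.toNat = j) :
    pvGetf (ws.foldl pvStepW g) i j = v := by
  induction ws generalizing g with
  | nil => simp at hex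
  | cons w ws ih =>
    simp only [List.foldl_cons]
    by_cases hex' : ∃ w' ∈ ws, w'.1.toNat = i ∧ w'.2.1.toNat = j
    · obtain ⟨s1, s2⟩ := pvShape_set2 g w.1 w.2.1 w.2.2
      exact ih (pvStepW g w) (by rw [pvStepW, s1]; exact hi)
        (by rw [pvStepW, s2]; exact hj)
        (fun w' hw' => hall w' (List.mem_cons_of_mem _ hw')) hex'
    · have hwt : w.1.toNat = i ∧ w.2.1.toNat = j := by
        rcases hex with ⟨w', hw', ht⟩
        rcases List.mem_cons.mp hw' with h | h
        · subst h; exact ht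
        · exact absurd ⟨w', h, ht⟩ hex'
      rw [pvFold_no_target ws (pvStepW g w) i j
        (fun w' hw' hc => hex' ⟨w', hw', hc⟩)]
      rw [pvStepW, pvGetf_set2, if_pos ⟨hwt.1, hwt.2, hi, hj⟩]
      exact hall w List.mem_cons_self hwt


theorem pvMem_writes (g : List (List String)) (w : Int × Int × String) :
    w ∈ pvWrites g ↔
      ∃ y, ∃ _ : y < g.length, ∃ x, ∃ _ : x < (g.getD y []).length,
        (w = (2 * (y : Int) + 1, 2 * (x : Int) + 1, (g.getD y []).getD x ".") ∨
          ∃ d ∈ pvConn ((g.getD y []).getD x "."),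
            w = (2 * (y : Int) + 1 + d.2, 2 * (x : Int) + 1 + d.1, "#")) := by
  unfold pvWrites
  simp only [List.mem_flatMap, PySem.List.mem_enumerate_iff, List.mem_cons, List.mem_map]
  constructor
  · rintro ⟨yr, ⟨y, hy, rfl⟩, xc, ⟨x, hx, rfl⟩, hw⟩
    have hrow : g.getD y [] = g[y] := by
      simp [List.getD_eq_getElem?_getD, List.getElem?_eq_getElem hy]
    refine ⟨y, hy, x, by rw [hrow]; exact hx, ?_⟩
    have hc : (g.getD y []).getD x "." = g[y][x] := by
      rw [hrow]; simp [List.getD_eq_getElem?_getD, List.getElem?_eq_getElem hx]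
    rcases hw with hw | ⟨d, hd, hw⟩
    · left; rw [hc]; simpa using hw
    · right; exact ⟨d, by rw [hc]; exact hd, by simpa using hw.symm⟩
  · rintro ⟨y, hy, x, hx, hw⟩
    have hrow : g.getD y [] = g[y] := by
      simp [List.getD_eq_getElem?_getD, List.getElem?_eq_getElem hy]
    have hx' : x < g[y].length := by rw [hrow] at hx; exact hx
    have hc : (g.getD y []).getD x "." = g[y][x] := by
      rw [hrow]; simp [List.getD_eq_getElem?_getD, List.getElem?_eq_getElem hx']
    refine ⟨(↑y, g[y]), ⟨y, hy, by simp⟩, (↑x, g[y][x]), ⟨x, hx', by simp⟩, ?_⟩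
    rcases hw with hw | ⟨d, hd, hw⟩
    · left; rw [hc] at hw; simpa using hw
    · right; exact ⟨d, by rw [hc] at hd; exact hd, by simp [hw]⟩



theorem pvConnects_eq (g : List (List String)) (y x : Int) (d : Int × Int) :
    pvConnects g y x d = true ↔
      0 ≤ y ∧ y < (g.length : Int) ∧ 0 ≤ x ∧ x < ((g.getD y.toNat []).length : Int) ∧
        d ∈ pvConn ((g.getD y.toNat []).getD x.toNat ".") := by
  unfold pvConnects
  split_ifs with h
  · simp only [decide_eq_true_eq]
    exact ⟨fun hm => ⟨h.1, h.2.1, h.2.2.1, h.2.2.2, hm⟩, fun hm => hm.2.2.2.2⟩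
  · simp only [false_iff]
    intro hc
    exact h ⟨hc.1, hc.2.1, hc.2.2.1, hc.2.2.2.1⟩

theorem pvConn_dirs (c : String) (d : Int × Int) (h : d ∈ pvConn c) :
    d = (1, 0) ∨ d = (-1, 0) ∨ d = (0, 1) ∨ d = (0, -1) := by
  unfold pvConn at h
  split_ifs at h <;> simp_all <;> tauto

theorem pvGetf_A (g : List (List String)) (i j : Nat) (hi : i < 2 * g.length + 1) (hj : j < 2 * (g.headD []).length + 1) :
    pvGetf (make_expanded_grid g) i j = pvCellB g i j := by
  have hA := pvA_as_fold g
  set W := (g.headD []).length with hW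
  set H := g.length with hH
  set g0 := List.replicate (2 * H + 1) (List.replicate (2 * W + 1) (".":String)) with hg0
  have hg0len : g0.length = 2 * H + 1 := by simp [hg0]
  have hrow0 : ∀ k, k < 2 * H + 1 → g0.getD k [] = List.replicate (2 * W + 1) "." := by
    intro k hk
    simp [hg0, List.getD_eq_getElem?_getD, hk]
  have hgetf0 : ∀ k l, pvGetf g0 k l = "." := by
    intro k l
    unfold pvGetf
    rw [hg0]
    simp only [List.getD_eq_getElem?_getD, List.getElem?_replicate]
    split_ifs <;> simp
  have hi' : i < g0.length := by rw [hg0len]; exact hi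
  have hj' : j < (g0.getD i []).length := by rw [hrow0 i hi]; simpa using hj
  rw [hA]
  rcases Nat.mod_two_eq_zero_or_one i with hio | hio <;>
    rcases Nat.mod_two_eq_zero_or_one j with hjo | hjo
  · -- even, even: never written
    rw [pvFold_no_target]
    · rw [hgetf0]
      unfold pvCellB
      rw [if_neg (by omega), if_neg (by omega), if_neg (by omega)]
    · intro w hw ht
      rcases (pvMem_writes g w).mp hw with ⟨y, hy, x, hx, hc | ⟨d, hd, hc⟩⟩
      · subst hc; simp only at ht; omega
      · rcases pvConn_dirs _ _ hd with rfl | rfl | rfl | rfl <;>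
          (subst hc; simp only at ht; omega)
  · -- even row, odd column: vertical connector slots
    have hx : j / 2 < W := by omega
    by_cases hP :
        (2 ≤ i ∧ j / 2 < (g.getD (i / 2 - 1) []).length ∧
          ((0 : Int), (1 : Int)) ∈ pvConn ((g.getD (i / 2 - 1) []).getD (j / 2) ".")) ∨
        (i / 2 < H ∧ j / 2 < (g.getD (i / 2) []).length ∧
          ((0 : Int), (-1 : Int)) ∈ pvConn ((g.getD (i / 2) []).getD (j / 2) "."))
    · rw [pvFold_target _ _ i j "#" hi' hj' ?hall ?hex]
      case hall =>
        intro w hw ht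
        rcases (pvMem_writes g w).mp hw with ⟨y, hy, x, hx', hc | ⟨d, hd, hc⟩⟩
        · subst hc; simp only at ht; omega
        · subst hc; rfl
      case hex =>
        rcases hP with ⟨h2i, hxl, hm⟩ | ⟨hyl, hxl, hm⟩
        · have hy1 : i / 2 - 1 < H := by omega
          refine ⟨_, (pvMem_writes g _).mpr ⟨i / 2 - 1, hy1, j / 2, hxl,
            Or.inr ⟨((0 : Int), (1 : Int)), hm, rfl⟩⟩, ?_⟩
          simp only
          omega
        · refine ⟨_, (pvMem_writes g _).mpr ⟨i / 2, hyl, j / 2, hxl,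
            Or.inr ⟨((0 : Int), (-1 : Int)), hm, rfl⟩⟩, ?_⟩
          simp only
          omega
      · unfold pvCellB
        rw [if_neg (by omega), if_neg (by omega), if_pos (by omega), if_pos ?_]
        rw [Bool.or_eq_true, pvConnects_eq, pvConnects_eq]
        rcases hP with ⟨h2i, hxl, hm⟩ | ⟨hyl, hxl, hm⟩
        · left
          have he : (((i / 2 : Nat) : Int) - 1).toNat = i / 2 - 1 := by omega
          simp only [he, Int.toNat_natCast]
          exact ⟨by omega, by omega, by omega, by omega, hm⟩
        · right
          simp only [Int.toNat_natCast]
          exact ⟨by omega, by omega, by omega, by omega, hm⟩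
    · rw [pvFold_no_target]
      · rw [hgetf0]
        unfold pvCellB
        rw [if_neg (by omega), if_neg (by omega), if_pos (by omega), if_neg ?_]
        rw [Bool.or_eq_true, pvConnects_eq, pvConnects_eq]
        rintro (⟨ha, hb, hc, hd, hm⟩ | ⟨ha, hb, hc, hd, hm⟩)
        · have he : (((i / 2 : Nat) : Int) - 1).toNat = i / 2 - 1 := by omega
          simp only [he, Int.toNat_natCast] at hd hm
          exact hP (Or.inl ⟨by omega, by omega, hm⟩)
        · simp only [Int.toNat_natCast] at hd hm
          exact hP (Or.inr ⟨by omega, by omega, hm⟩)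
      · intro w hw ht
        rcases (pvMem_writes g w).mp hw with ⟨y, hy, x, hx', hc | ⟨d, hd, hc⟩⟩
        · subst hc; simp only at ht; omega
        · rcases pvConn_dirs _ _ hd with rfl | rfl | rfl | rfl <;>
            (subst hc; simp only at ht)
          · omega
          · omega
          · -- d = (0,1): write from the row above; would make hP's left disjunct true
            have hyv : y = i / 2 - 1 ∧ x = j / 2 ∧ 2 ≤ i := by omega
            exact hP (Or.inl ⟨hyv.2.2, by rw [← hyv.1, ← hyv.2.1]; exact hx',
              by rw [← hyv.1, ← hyv.2.1]; exact hd⟩)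
          · have hyv : y = i / 2 ∧ x = j / 2 := by omega
            exact hP (Or.inr ⟨by omega, by rw [← hyv.1, ← hyv.2]; exact hx',
              by rw [← hyv.1, ← hyv.2]; exact hd⟩)
  · -- odd row, even column: horizontal connector slots
    have hy : i / 2 < H := by omega
    by_cases hP :
        (2 ≤ j ∧ j / 2 - 1 < (g.getD (i / 2) []).length ∧
          ((1 : Int), (0 : Int)) ∈ pvConn ((g.getD (i / 2) []).getD (j / 2 - 1) ".")) ∨
        (j / 2 < (g.getD (i / 2) []).length ∧
          ((-1 : Int), (0 : Int)) ∈ pvConn ((g.getD (i / 2) []).getD (j / 2) "."))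
    · rw [pvFold_target _ _ i j "#" hi' hj' ?hall ?hex]
      case hall =>
        intro w hw ht
        rcases (pvMem_writes g w).mp hw with ⟨y, hy', x, hx', hc | ⟨d, hd, hc⟩⟩
        · subst hc; simp only at ht; omega
        · subst hc; rfl
      case hex =>
        rcases hP with ⟨h2j, hxl, hm⟩ | ⟨hxl, hm⟩
        · refine ⟨_, (pvMem_writes g _).mpr ⟨i / 2, hy, j / 2 - 1, hxl,
            Or.inr ⟨((1 : Int), (0 : Int)), hm, rfl⟩⟩, ?_⟩
          simp only
          omega
        · refine ⟨_, (pvMem_writes g _).mpr ⟨i / 2, hy, j / 2, hxl,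
            Or.inr ⟨((-1 : Int), (0 : Int)), hm, rfl⟩⟩, ?_⟩
          simp only
          omega
      · unfold pvCellB
        rw [if_neg (by omega), if_pos (by omega), if_pos ?_]
        rw [Bool.or_eq_true, pvConnects_eq, pvConnects_eq]
        rcases hP with ⟨h2j, hxl, hm⟩ | ⟨hxl, hm⟩
        · left
          have he : (((j / 2 : Nat) : Int) - 1).toNat = j / 2 - 1 := by omega
          simp only [he, Int.toNat_natCast]
          exact ⟨by omega, by omega, by omega, by omega, hm⟩
        · right
          simp only [Int.toNat_natCast]
          exact ⟨by omega, by omega, by omega, by omega, hm⟩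
    · rw [pvFold_no_target]
      · rw [hgetf0]
        unfold pvCellB
        rw [if_neg (by omega), if_pos (by omega), if_neg ?_]
        rw [Bool.or_eq_true, pvConnects_eq, pvConnects_eq]
        rintro (⟨ha, hb, hc, hd, hm⟩ | ⟨ha, hb, hc, hd, hm⟩)
        · have he : (((j / 2 : Nat) : Int) - 1).toNat = j / 2 - 1 := by omega
          simp only [he, Int.toNat_natCast] at hd hm
          exact hP (Or.inl ⟨by omega, by omega, hm⟩)
        · simp only [Int.toNat_natCast] at hd hm
          exact hP (Or.inr ⟨by omega, hm⟩)
      · intro w hw ht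
        rcases (pvMem_writes g w).mp hw with ⟨y, hy', x, hx', hc | ⟨d, hd, hc⟩⟩
        · subst hc; simp only at ht; omega
        · rcases pvConn_dirs _ _ hd with rfl | rfl | rfl | rfl <;>
            (subst hc; simp only at ht)
          · have hyv : y = i / 2 ∧ x = j / 2 - 1 ∧ 2 ≤ j := by omega
            exact hP (Or.inl ⟨hyv.2.2, by rw [← hyv.1, ← hyv.2.1]; exact hx',
              by rw [← hyv.1, ← hyv.2.1]; exact hd⟩)
          · have hyv : y = i / 2 ∧ x = j / 2 := by omega
            exact hP (Or.inr ⟨by rw [← hyv.1, ← hyv.2]; exact hx',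
              by rw [← hyv.1, ← hyv.2]; exact hd⟩)
          · omega
          · omega
  · -- odd, odd: the copied input character
    have hy : i / 2 < H := by omega
    by_cases hx : j / 2 < (g.getD (i / 2) []).length
    · rw [pvFold_target _ _ i j ((g.getD (i / 2) []).getD (j / 2) ".") hi' hj' ?hall ?hex]
      case hall =>
        intro w hw ht
        rcases (pvMem_writes g w).mp hw with ⟨y, hy', x, hx', hc | ⟨d, hd, hc⟩⟩
        · subst hc
          simp only at ht ⊢
          have : y = i / 2 ∧ x = j / 2 := by omega
          rw [this.1, this.2]
        · rcases pvConn_dirs _ _ hd with rfl | rfl | rfl | rfl <;>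
            (subst hc; simp only at ht; omega)
      case hex =>
        refine ⟨_, (pvMem_writes g _).mpr ⟨i / 2, hy, j / 2, hx, Or.inl rfl⟩, ?_⟩
        simp only
        omega
      · unfold pvCellB
        rw [if_pos (by omega), if_pos hx]
    · rw [pvFold_no_target]
      · rw [hgetf0]
        unfold pvCellB
        rw [if_pos (by omega), if_neg hx]
      · intro w hw ht
        rcases (pvMem_writes g w).mp hw with ⟨y, hy', x, hx', hc | ⟨d, hd, hc⟩⟩
        · subst hc
          simp only at ht
          have : y = i / 2 ∧ x = j / 2 := by omega
          exact hx (by rw [← this.1, ← this.2]; exact hx')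
        · rcases pvConn_dirs _ _ hd with rfl | rfl | rfl | rfl <;>
            (subst hc; simp only at ht; omega)


-- ===== VERDICT (by name: the statement is the Claim_ definition above) =====
theorem make_expanded_grid_spec : Claim_equal_make_expanded_grid := by
  intro g _ _
  unfold Spec_make_expanded_grid
  have hA := pvA_as_fold g
  have hlenA : (make_expanded_grid g).length = 2 * g.length + 1 := by
    rw [hA, (pvShape_fold _ _).1]
    simp
  have hrowA : ∀ i, i < 2 * g.length + 1 →
      ((make_expanded_grid g).getD i []).length = 2 * (g.headD []).length + 1 := by
    intro i hi
    rw [hA, (pvShape_fold _ _).2 i]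
    simp [List.getD_eq_getElem?_getD, hi]
  have hlenB : (make_expanded_grid_alt g).length = 2 * g.length + 1 := by
    simp [make_expanded_grid_alt]
  apply List.ext_getElem (by rw [hlenA, hlenB])
  intro i h1 h2
  have hi : i < 2 * g.length + 1 := by rw [hlenA] at h1; exact h1
  have hrowA' : (make_expanded_grid g)[i] = (make_expanded_grid g).getD i [] := by
    simp [List.getD_eq_getElem?_getD, List.getElem?_eq_getElem h1]
  have hrowB : (make_expanded_grid_alt g)[i] =
      (List.range (2 * (g.headD []).length + 1)).map (fun j => pvCellB g i j) := by
    simp [make_expanded_grid_alt]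
  apply List.ext_getElem (by rw [hrowA', hrowA i hi, hrowB]; simp)
  intro j hj1 hj2
  have hj : j < 2 * (g.headD []).length + 1 := by
    rw [hrowA', hrowA i hi] at hj1; exact hj1
  have hcell := pvGetf_A g i j hi hj
  have hL : (make_expanded_grid g)[i][j] = pvGetf (make_expanded_grid g) i j := by
    unfold pvGetf
    rw [← hrowA']
    simp [List.getD_eq_getElem?_getD, List.getElem?_eq_getElem hj1]
  rw [hL, hcell]
  have hj2' : j < ((List.range (2 * (g.headD []).length + 1)).map
      (fun j => pvCellB g i j)).length := by simpa using hj
  calc pvCellB g i j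
      = ((List.range (2 * (g.headD []).length + 1)).map (fun j => pvCellB g i j))[j]'hj2' := by
        simp
    _ = (make_expanded_grid_alt g)[i][j] := by
        congr 1
        exact hrowB.symm
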